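-- pv_equiv track=rewrite | github.com/AllanKoder/Competitive-Programming-Training | practice/digits_dp/max_product.py | best_in_range
-- ===== SOURCE A (Python) =====
-- import functools
--
-- def best_in_range(l: int, r: int):
--     L, R = str(l), str(r)
--     n = len(R)
--     L = L.zfill(n)  # pad l with zeros to align with r
--
--     @functools.lru_cache(None)
--     def dp(pos, tight_low, tight_high, leading):
--         if pos == n:
--             return (0, "") if leading else (1, "")
--
--         lo = int(L[pos]) if tight_low else 0
--         hi = int(R[pos]) if tight_high else 9
--
--         best = (0, "")
--         for d in range(lo, hi+1):
--             new_low = tight_low and d == lo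
--             new_high = tight_high and d == hi
--             new_leading = leading and d == 0
--
--             sub_prod, sub_num = dp(pos+1, new_low, new_high, new_leading)
--
--             if new_leading:
--                 cand_prod = sub_prod
--                 cand_num = sub_num
--             else:
--                 cand_prod = (d if sub_prod > 0 else d) * sub_prod if sub_prod else d
--                 cand_num = str(d) + sub_num
--
--             if cand_prod > best[0] or (cand_prod == best[0] and cand_num > best[1]):
--                 best = (cand_prod, cand_num)
--
--         return best
--
--     return dp(0, True, True, True)[1]
-- ===== SOURCE B (Python) =====
-- def best_in_range(l: int, r: int):
--     # Bottom-up digit DP: instead of A's memoized top-down recursion over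
--     # (pos, tight_low, tight_high, leading), iterate positions from the last
--     # digit to the first, maintaining an explicit 8-entry table (one entry per
--     # flag combination) for the current position.
--     L, R = str(l), str(r)
--     n = len(R)
--     L = L.zfill(n)
--
--     def pick(t, tl, th, ld):
--         return t[(4 if tl else 0) + (2 if th else 0) + (1 if ld else 0)]
--
--     def merged(lo, hi, tl, th, ld, t):
--         best = (0, "")
--         for d in range(lo, hi + 1):
--             sp, sn = pick(t, tl and d == lo, th and d == hi, ld and d == 0)
--             if ld and d == 0:
--                 cand = (sp, sn)
--             else:
--                 cand = ((d * sp if sp else d), str(d) + sn)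
--             if cand[0] > best[0] or (cand[0] == best[0] and cand[1] > best[1]):
--                 best = cand
--         return best
--
--     t = ((1, ""), (0, ""), (1, ""), (0, ""), (1, ""), (0, ""), (1, ""), (0, ""))
--     for pos in reversed(range(n)):
--         lo, hi = int(L[pos]), int(R[pos])
--         t = (merged(0, 9, False, False, False, t),
--              merged(0, 9, False, False, True, t),
--              merged(0, hi, False, True, False, t),
--              merged(0, hi, False, True, True, t),
--              merged(lo, 9, True, False, False, t),
--              merged(lo, 9, True, False, True, t),
--              merged(lo, hi, True, True, False, t),
--              merged(lo, hi, True, True, True, t))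
--     return pick(t, True, True, True)[1]
-- ===== Notes on version B (the rewrite author's own statement) =====
-- stated objective: alternative
-- what changed: Replaced A's memoized top-down recursion over (pos, tight_low, tight_high, leading) with an iterative bottom-up pass that carries an explicit 8-entry table (one entry per flag combination) from the last digit position to the first.
import Mathlib
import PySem

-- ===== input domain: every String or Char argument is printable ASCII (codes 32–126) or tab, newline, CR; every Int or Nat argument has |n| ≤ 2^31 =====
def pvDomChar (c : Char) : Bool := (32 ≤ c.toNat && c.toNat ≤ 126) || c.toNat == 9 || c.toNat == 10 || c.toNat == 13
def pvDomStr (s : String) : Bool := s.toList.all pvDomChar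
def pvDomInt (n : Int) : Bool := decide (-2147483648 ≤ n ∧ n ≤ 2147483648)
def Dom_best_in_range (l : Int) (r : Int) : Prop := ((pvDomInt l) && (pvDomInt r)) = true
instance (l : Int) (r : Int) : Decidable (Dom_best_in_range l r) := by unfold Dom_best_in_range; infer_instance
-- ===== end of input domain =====

-- B replaces A's memoized top-down recursion over (pos, tight_low, tight_high, leading) by an
-- iterative bottom-up pass that carries an explicit 8-entry table (one entry per flag combination)
-- from the last digit position to the first; same cost, different decomposition (objective: alternative).

-- ===== PORT A =====

-- int(s[p]) for a single decimal-digit character; exact whenever s[p] is a digit '0'-'9',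
-- which holds for every index A reads when 0 ≤ l and 0 ≤ r (Pre_); for negative arguments
-- Python's int('-') raises ValueError, and those inputs are excluded by Pre_.
def pvDigitAt (s : List Char) (p : Nat) : Int :=
  ((s.getD p '0').toNat : Int) - 48

-- L.zfill(n); exact for sign-free numerals (the only ones reachable under Pre_).
def pvZfill (s : List Char) (n : Nat) : List Char :=
  List.replicate (n - s.length) '0' ++ s

-- dp(pos, tight_low, tight_high, leading) from A, with rem = n - pos as the recursion argument
-- and A's @functools.lru_cache ported as an explicitly threaded cache keyed by the call arguments.
def pvDpAM (L R : List Char) (n : Nat) (rem : Nat) (tl th ld : Bool)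
    (cache : PySem.Dict (Nat × Bool × Bool × Bool) (Int × List Char)) :
    (Int × List Char) × PySem.Dict (Nat × Bool × Bool × Bool) (Int × List Char) :=
  match cache.get? (rem, tl, th, ld) with
  | some v => (v, cache)
  | none =>
    match rem with
    | 0 =>
      let v : Int × List Char := if ld then (0, []) else (1, [])
      (v, cache.insert (0, tl, th, ld) v)
    | rem' + 1 =>
      let pos := n - (rem' + 1)
      let lo : Int := if tl then pvDigitAt L pos else 0
      let hi : Int := if th then pvDigitAt R pos else 9
      let res := (PySem.List.pyRange lo (hi + 1) 1).foldl (fun bc d =>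
        let nl := tl && decide (d = lo)
        let nh := th && decide (d = hi)
        let nld := ld && decide (d = 0)
        let sc := pvDpAM L R n rem' nl nh nld bc.2
        let sub := sc.1
        let cand : Int × List Char :=
          if nld then sub
          else ((if sub.1 ≠ 0 then (if sub.1 > 0 then d else d) * sub.1 else d),
                PySem.Int.toChars d ++ sub.2)
        (if cand.1 > bc.1.1 || (cand.1 == bc.1.1 && PySem.Chars.strLt bc.1.2 cand.2) then cand
         else bc.1, sc.2)) ((0, []), cache)
      (res.1, res.2.insert (rem' + 1, tl, th, ld) res.1)

def best_in_range (l : Int) (r : Int) : String :=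
  let L0 := PySem.Int.toChars l
  let R := PySem.Int.toChars r
  let n := R.length
  let L := pvZfill L0 n
  String.ofList (pvDpAM L R n n true true true PySem.Dict.empty).1.2

-- ===== PORT B =====

-- t[(4 if tl else 0) + (2 if th else 0) + (1 if ld else 0)]
def pvPick (t : List (Int × List Char)) (tl th ld : Bool) : Int × List Char :=
  t.getD ((if tl then 4 else 0) + (if th then 2 else 0) + (if ld then 1 else 0)) (0, [])

-- B's merged(lo, hi, tl, th, ld, t): the inner d-loop reading sub-results from the table t.
def pvMerged (lo hi : Int) (tl th ld : Bool) (t : List (Int × List Char)) : Int × List Char :=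
  (PySem.List.pyRange lo (hi + 1) 1).foldl (fun best d =>
    let sub := pvPick t (tl && decide (d = lo)) (th && decide (d = hi)) (ld && decide (d = 0))
    let cand : Int × List Char :=
      if ld && decide (d = 0) then sub
      else ((if sub.1 ≠ 0 then (if sub.1 > 0 then d else d) * sub.1 else d),
            PySem.Int.toChars d ++ sub.2)
    if cand.1 > best.1 || (cand.1 == best.1 && PySem.Chars.strLt best.2 cand.2) then cand
    else best) (0, [])

-- one iteration of B's position loop: rebuild the 8-entry table for position pos
def pvStepB (L R : List Char) (t : List (Int × List Char)) (pos : Nat) : List (Int × List Char) :=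
  let lo := pvDigitAt L pos
  let hi := pvDigitAt R pos
  [pvMerged 0 9 false false false t,
   pvMerged 0 9 false false true t,
   pvMerged 0 hi false true false t,
   pvMerged 0 hi false true true t,
   pvMerged lo 9 true false false t,
   pvMerged lo 9 true false true t,
   pvMerged lo hi true true false t,
   pvMerged lo hi true true true t]

def pvInitB : List (Int × List Char) :=
  [(1, []), (0, []), (1, []), (0, []), (1, []), (0, []), (1, []), (0, [])]

def best_in_range_alt (l : Int) (r : Int) : String :=
  let L0 := PySem.Int.toChars l
  let R := PySem.Int.toChars r
  let n := R.length
  let L := pvZfill L0 n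
  let t := ((List.range n).reverse).foldl (pvStepB L R) pvInitB
  String.ofList (pvPick t true true true).2

-- ===== PRECONDITION & SPEC =====
-- Pre_ excludes exactly the inputs where A raises: for l < 0 or r < 0 the sign character
-- reaches int(), which raises ValueError (A returns on every other input, including l > r).
def Pre_best_in_range (l : Int) (r : Int) : Prop := 0 ≤ l ∧ 0 ≤ r
instance (l : Int) (r : Int) : Decidable (Pre_best_in_range l r) := by
  unfold Pre_best_in_range; infer_instance

def pvWitness_best_in_range : Int × Int := (3, 17)

def Spec_best_in_range (l : Int) (r : Int) (out : String) : Prop := out = best_in_range_alt l r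
instance (l : Int) (r : Int) (out : String) : Decidable (Spec_best_in_range l r out) := by
  unfold Spec_best_in_range; infer_instance

-- ===== CLAIM (what is proved, stated in full; the proofs are below) =====
def Claim_equal_best_in_range : Prop := ∀ (l : Int) (r : Int), Dom_best_in_range l r → Pre_best_in_range l r → Spec_best_in_range l r (best_in_range l r)

-- ===== LEMMAS AND PROOFS =====

-- A's dp without the cache (proof-side reference implementation of pvDpAM)
def pvDpA (L R : List Char) (n : Nat) : Nat → Bool → Bool → Bool → Int × List Char
  | 0, _, _, ld => if ld then (0, []) else (1, [])
  | rem + 1, tl, th, ld =>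
    let pos := n - (rem + 1)
    let lo : Int := if tl then pvDigitAt L pos else 0
    let hi : Int := if th then pvDigitAt R pos else 9
    (PySem.List.pyRange lo (hi + 1) 1).foldl (fun best d =>
      let nl := tl && decide (d = lo)
      let nh := th && decide (d = hi)
      let nld := ld && decide (d = 0)
      let sub := pvDpA L R n rem nl nh nld
      let cand : Int × List Char :=
        if nld then sub
        else ((if sub.1 ≠ 0 then (if sub.1 > 0 then d else d) * sub.1 else d),
              PySem.Int.toChars d ++ sub.2)
      if cand.1 > best.1 || (cand.1 == best.1 && PySem.Chars.strLt best.2 cand.2) then cand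
      else best) (0, [])

-- every entry of the cache is the corresponding pure dp value
def pvCoh (L R : List Char) (n : Nat)
    (c : PySem.Dict (Nat × Bool × Bool × Bool) (Int × List Char)) : Prop :=
  ∀ rem tl th ld v, c.get? (rem, tl, th, ld) = some v → v = pvDpA L R n rem tl th ld

-- threading a cache through a foldl preserves the pure fold result and coherence
theorem pvFoldlThread {α β γ : Type} (fM : (β × γ) → α → (β × γ)) (fP : β → α → β)
    (Coh : γ → Prop)
    (h : ∀ b c a, Coh c → (fM (b, c) a).1 = fP b a ∧ Coh (fM (b, c) a).2) :
    ∀ (ds : List α) (b : β) (c : γ), Coh c →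
      (ds.foldl fM (b, c)).1 = ds.foldl fP b ∧ Coh (ds.foldl fM (b, c)).2 := by
  intro ds
  induction ds with
  | nil => intro b c hc; exact ⟨rfl, hc⟩
  | cons a ds ih =>
    intro b c hc
    have hstep := h b c a hc
    have hpair : fM (b, c) a = (fP b a, (fM (b, c) a).2) := by
      rw [← hstep.1]
    simp only [List.foldl_cons]
    rw [hpair]
    exact ih (fP b a) ((fM (b, c) a).2) hstep.2

theorem pvDpAM_correct (L R : List Char) (n : Nat) :
    ∀ (rem : Nat) (tl th ld : Bool) c, pvCoh L R n c →
      (pvDpAM L R n rem tl th ld c).1 = pvDpA L R n rem tl th ld ∧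
      pvCoh L R n (pvDpAM L R n rem tl th ld c).2 := by
  intro rem
  induction rem with
  | zero =>
    intro tl th ld c hc
    rw [pvDpAM]
    cases hget : c.get? (0, tl, th, ld) with
    | some v => exact ⟨hc 0 tl th ld v hget, hc⟩
    | none =>
      refine ⟨rfl, ?_⟩
      intro rem' tl' th' ld' v hv
      rw [PySem.Dict.get?_insert] at hv
      split at hv
      · rename_i heq
        simp only [Prod.mk.injEq] at heq
        obtain ⟨h1, h2, h3, h4⟩ := heq
        subst h1; subst h2; subst h3; subst h4
        injection hv with hv'
        subst hv'
        simp [pvDpA]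
      · exact hc rem' tl' th' ld' v hv
  | succ rem ih =>
    intro tl th ld c hc
    rw [pvDpAM]
    cases hget : c.get? (rem + 1, tl, th, ld) with
    | some v => exact ⟨hc (rem + 1) tl th ld v hget, hc⟩
    | none =>
      simp only []
      -- the threaded inner loop agrees with the pure inner loop
      have hfold := pvFoldlThread
        (fM := fun bc d =>
          let nl := tl && decide (d = (if tl then pvDigitAt L (n - (rem + 1)) else 0))
          let nh := th && decide (d = (if th then pvDigitAt R (n - (rem + 1)) else 9))
          let nld := ld && decide (d = 0)
          let sc := pvDpAM L R n rem nl nh nld bc.2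
          let sub := sc.1
          let cand : Int × List Char :=
            if nld then sub
            else ((if sub.1 ≠ 0 then (if sub.1 > 0 then d else d) * sub.1 else d),
                  PySem.Int.toChars d ++ sub.2)
          (if cand.1 > bc.1.1 || (cand.1 == bc.1.1 && PySem.Chars.strLt bc.1.2 cand.2) then cand
           else bc.1, sc.2))
        (fP := fun best d =>
          let nl := tl && decide (d = (if tl then pvDigitAt L (n - (rem + 1)) else 0))
          let nh := th && decide (d = (if th then pvDigitAt R (n - (rem + 1)) else 9))
          let nld := ld && decide (d = 0)
          let sub := pvDpA L R n rem nl nh nld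
          let cand : Int × List Char :=
            if nld then sub
            else ((if sub.1 ≠ 0 then (if sub.1 > 0 then d else d) * sub.1 else d),
                  PySem.Int.toChars d ++ sub.2)
          if cand.1 > best.1 || (cand.1 == best.1 && PySem.Chars.strLt best.2 cand.2) then cand
          else best)
        (Coh := pvCoh L R n)
        (h := by
          intro b c' d hc'
          have hsub := ih (tl && decide (d = (if tl then pvDigitAt L (n - (rem + 1)) else 0)))
            (th && decide (d = (if th then pvDigitAt R (n - (rem + 1)) else 9)))
            (ld && decide (d = 0)) c' hc'
          constructor
          · simp only []
            rw [hsub.1]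
          · exact hsub.2)
        (PySem.List.pyRange (if tl then pvDigitAt L (n - (rem + 1)) else 0)
          ((if th then pvDigitAt R (n - (rem + 1)) else 9) + 1) 1)
        (0, []) c hc
      refine ⟨?_, ?_⟩
      · rw [hfold.1, pvDpA]
      · intro rem' tl' th' ld' v hv
        rw [PySem.Dict.get?_insert] at hv
        split at hv
        · rename_i heq
          simp only [Prod.mk.injEq] at heq
          obtain ⟨h1, h2, h3, h4⟩ := heq
          subst h1; subst h2; subst h3; subst h4
          injection hv with hv'
          subst hv'
          rw [hfold.1, pvDpA]
        · exact hfold.2 rem' tl' th' ld' v hv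

theorem pvDpAM_eq_dpA (L R : List Char) (n rem : Nat) (tl th ld : Bool) :
    (pvDpAM L R n rem tl th ld PySem.Dict.empty).1 = pvDpA L R n rem tl th ld := by
  refine (pvDpAM_correct L R n rem tl th ld PySem.Dict.empty ?_).1
  intro rem' tl' th' ld' v hv
  simp [PySem.Dict.get?_empty] at hv

-- the table of A's dp values at remaining length `rem`, in pvPick's index order
def pvDpTable (L R : List Char) (n rem : Nat) : List (Int × List Char) :=
  [pvDpA L R n rem false false false,
   pvDpA L R n rem false false true,
   pvDpA L R n rem false true false,
   pvDpA L R n rem false true true,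
   pvDpA L R n rem true false false,
   pvDpA L R n rem true false true,
   pvDpA L R n rem true true false,
   pvDpA L R n rem true true true]

theorem pvPick_dpTable (L R : List Char) (n rem : Nat) (tl th ld : Bool) :
    pvPick (pvDpTable L R n rem) tl th ld = pvDpA L R n rem tl th ld := by
  cases tl <;> cases th <;> cases ld <;> rfl

theorem pvDpTable_zero (L R : List Char) (n : Nat) : pvDpTable L R n 0 = pvInitB := rfl

theorem pvMerged_dpA (L R : List Char) (n rem : Nat) (tl th ld : Bool) :
    pvMerged (if tl then pvDigitAt L (n - (rem + 1)) else 0)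
             (if th then pvDigitAt R (n - (rem + 1)) else 9)
             tl th ld (pvDpTable L R n rem)
      = pvDpA L R n (rem + 1) tl th ld := by
  rw [pvDpA]
  simp only [pvMerged, pvPick_dpTable]

theorem pvStepB_dpTable (L R : List Char) (n rem : Nat) :
    pvStepB L R (pvDpTable L R n rem) (n - (rem + 1)) = pvDpTable L R n (rem + 1) := by
  have e1 : pvMerged 0 9 false false false (pvDpTable L R n rem)
      = pvDpA L R n (rem + 1) false false false := by
    simpa using pvMerged_dpA L R n rem false false false
  have e2 : pvMerged 0 9 false false true (pvDpTable L R n rem)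
      = pvDpA L R n (rem + 1) false false true := by
    simpa using pvMerged_dpA L R n rem false false true
  have e3 : pvMerged 0 (pvDigitAt R (n - (rem + 1))) false true false (pvDpTable L R n rem)
      = pvDpA L R n (rem + 1) false true false := by
    simpa using pvMerged_dpA L R n rem false true false
  have e4 : pvMerged 0 (pvDigitAt R (n - (rem + 1))) false true true (pvDpTable L R n rem)
      = pvDpA L R n (rem + 1) false true true := by
    simpa using pvMerged_dpA L R n rem false true true
  have e5 : pvMerged (pvDigitAt L (n - (rem + 1))) 9 true false false (pvDpTable L R n rem)
      = pvDpA L R n (rem + 1) true false false := by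
    simpa using pvMerged_dpA L R n rem true false false
  have e6 : pvMerged (pvDigitAt L (n - (rem + 1))) 9 true false true (pvDpTable L R n rem)
      = pvDpA L R n (rem + 1) true false true := by
    simpa using pvMerged_dpA L R n rem true false true
  have e7 : pvMerged (pvDigitAt L (n - (rem + 1))) (pvDigitAt R (n - (rem + 1))) true true false
      (pvDpTable L R n rem) = pvDpA L R n (rem + 1) true true false := by
    simpa using pvMerged_dpA L R n rem true true false
  have e8 : pvMerged (pvDigitAt L (n - (rem + 1))) (pvDigitAt R (n - (rem + 1))) true true true
      (pvDpTable L R n rem) = pvDpA L R n (rem + 1) true true true := by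
    simpa using pvMerged_dpA L R n rem true true true
  simp only [pvStepB]
  rw [e1, e2, e3, e4, e5, e6, e7, e8]
  rfl

theorem pvFold_dpTable (L R : List Char) (n : Nat) :
    ∀ j, j ≤ n →
      ((List.range j).reverse).foldl (pvStepB L R) (pvDpTable L R n (n - j)) = pvDpTable L R n n := by
  intro j
  induction j with
  | zero => intro _; simp
  | succ j ih =>
    intro hj
    have hrange : (List.range (j + 1)).reverse = j :: (List.range j).reverse := by
      rw [List.range_succ, List.reverse_append]; rfl
    rw [hrange, List.foldl_cons]
    have hstep : pvStepB L R (pvDpTable L R n (n - (j + 1))) j = pvDpTable L R n (n - j) := by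
      have h := pvStepB_dpTable L R n (n - (j + 1))
      rw [show n - (n - (j + 1) + 1) = j from by omega] at h
      rw [h, show n - (j + 1) + 1 = n - j from by omega]
    rw [hstep]
    exact ih (by omega)

-- ===== VERDICT (by name: the statement is the Claim_ definition above) =====
theorem best_in_range_spec : Claim_equal_best_in_range := by
  intro l r _ _
  unfold Spec_best_in_range best_in_range best_in_range_alt
  have h := pvFold_dpTable (pvZfill (PySem.Int.toChars l) (PySem.Int.toChars r).length)
      (PySem.Int.toChars r) (PySem.Int.toChars r).length (PySem.Int.toChars r).length
      (le_refl _)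
  simp only [Nat.sub_self, pvDpTable_zero] at h
  simp only [pvDpAM_eq_dpA, h, pvPick_dpTable]
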